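-- pv_equiv track=rewrite | github.com/Devisree4/python | Devipriya2.py | squares
-- ===== SOURCE A (Python) =====
-- import math
--
-- def even(number):
--     for digit in str(number):
--         if int(digit) % 2 != 0:
--             return False
--     return True
--
-- def squares(start, end):
--     results = []
--     for num in range(start, end + 1):
--         if even(num):
--             sqrt = math.isqrt(num)
--             if sqrt * sqrt == num:
--                 results.append(num)
--     return results
-- ===== SOURCE B (Python) =====
-- import math
--
-- def squares(start, end):
--     # iterate over square roots instead of over every number in the range
--     if end < 0 or start > end:
--         return []
--     lo = max(start, 0)
--     r = math.isqrt(lo)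
--     if r * r < lo:
--         r += 1
--     results = []
--     for k in range(r, math.isqrt(end) + 1):
--         n = k * k
--         if all(int(d) % 2 == 0 for d in str(n)):
--             results.append(n)
--     return results
-- ===== Notes on version B (the rewrite author's own statement) =====
-- stated objective: faster
-- what changed: B enumerates integer square roots k in [ceil(sqrt(start)), isqrt(end)] and digit-checks k*k, instead of scanning every number in [start, end] and testing squareness; O(sqrt(end)) candidates instead of O(end-start).
import Mathlib
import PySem

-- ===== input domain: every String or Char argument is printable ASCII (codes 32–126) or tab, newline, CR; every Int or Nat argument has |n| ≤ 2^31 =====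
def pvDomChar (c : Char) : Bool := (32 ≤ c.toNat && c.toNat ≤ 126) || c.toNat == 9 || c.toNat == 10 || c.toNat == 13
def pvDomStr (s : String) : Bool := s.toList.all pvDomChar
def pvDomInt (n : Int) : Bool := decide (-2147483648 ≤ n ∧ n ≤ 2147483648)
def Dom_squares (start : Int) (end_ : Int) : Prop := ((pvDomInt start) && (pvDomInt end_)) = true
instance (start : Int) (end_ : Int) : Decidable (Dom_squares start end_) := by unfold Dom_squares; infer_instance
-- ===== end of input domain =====

-- B replaces A's scan of every number in [start, end] by a scan of the integer
-- square roots in [ceil(sqrt(max(start,0))), isqrt(end)] (fewer candidates).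

-- ===== PORT A =====
-- even(number): early-return loop over the digits of str(number).
-- int(digit) for a single digit char '0'..'9' is (c.toNat - 48); exact on Pre_ (num ≥ 0),
-- and Int.emod _ 2 agrees with Python's % 2 on these nonnegative values.
def pyEvenA : List Char → Bool
  | [] => true
  | c :: rest => if ((c.toNat : Int) - 48) % 2 ≠ 0 then false else pyEvenA rest

-- math.isqrt = Int.sqrt, exact on nonnegative arguments (all calls inside Pre_ are such).
def squares (start : Int) (end_ : Int) : List Int :=
  (PySem.List.pyRange start (end_ + 1) 1).foldl
    (fun results num =>
      if pyEvenA (PySem.Int.toStr num).toList then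
        let sqrt := Int.sqrt num
        if sqrt * sqrt = num then results ++ [num] else results
      else results) []

-- ===== PORT B =====
-- all(int(d) % 2 == 0 for d in str(n)); n ≥ 0 on every call B makes.
def allEvenDigits (n : Int) : Bool :=
  (PySem.Int.toStr n).toList.all (fun c => ((c.toNat : Int) - 48) % 2 == 0)

def squares_alt (start : Int) (end_ : Int) : List Int :=
  if end_ < 0 ∨ start > end_ then []
  else
    let lo := max start 0
    let r0 := Int.sqrt lo
    let r := if r0 * r0 < lo then r0 + 1 else r0
    (PySem.List.pyRange r (Int.sqrt end_ + 1) 1).foldl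
      (fun results k =>
        let n := k * k
        if allEvenDigits n then results ++ [n] else results) []

-- ===== PRECONDITION & SPEC =====
-- A iterates num = start, start+1, …; even(num) calls int('-') and raises ValueError as soon
-- as a negative num is reached, i.e. exactly when start < 0 and the range is nonempty.
def Pre_squares (start : Int) (end_ : Int) : Prop := 0 ≤ start ∨ end_ < start
instance (start : Int) (end_ : Int) : Decidable (Pre_squares start end_) := by unfold Pre_squares; infer_instance
def pvWitness_squares : Int × Int := (0, 100)

def Spec_squares (start : Int) (end_ : Int) (out : List Int) : Prop := out = squares_alt start end_
instance (start : Int) (end_ : Int) (out : List Int) : Decidable (Spec_squares start end_ out) := by unfold Spec_squares; infer_instance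

-- ===== CLAIM (what is proved, stated in full; the proofs are below) =====
def Claim_equal_squares : Prop := ∀ (start : Int) (end_ : Int), Dom_squares start end_ → Pre_squares start end_ → Spec_squares start end_ (squares start end_)

-- ===== LEMMAS AND PROOFS =====

-- A's early-return digit loop is the same test as B's `all`.
theorem pyEvenA_eq_all (l : List Char) :
    pyEvenA l = l.all (fun c => ((c.toNat : Int) - 48) % 2 == 0) := by
  induction l with
  | nil => rfl
  | cons c rest ih =>
    simp only [pyEvenA, List.all_cons, ih]
    by_cases h : ((c.toNat : Int) - 48) % 2 = 0 <;> simp [h]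

theorem sqrt_nonneg_int (n : Int) : 0 ≤ Int.sqrt n := by
  rw [Int.sqrt]; positivity

-- characterisation of Int.sqrt on nonnegative arguments
theorem sq_le_iff_le_sqrt {k n : Int} (hk : 0 ≤ k) (hn : 0 ≤ n) :
    k * k ≤ n ↔ k ≤ Int.sqrt n := by
  rw [Int.sqrt]
  obtain ⟨K, rfl⟩ := Int.eq_ofNat_of_zero_le hk
  obtain ⟨N, rfl⟩ := Int.eq_ofNat_of_zero_le hn
  rw [Int.toNat_natCast]
  constructor
  · intro h
    exact_mod_cast Nat.le_sqrt.mpr (by exact_mod_cast h)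
  · intro h
    have hKN : K ≤ Nat.sqrt N := by exact_mod_cast h
    have h1 : K * K ≤ Nat.sqrt N * Nat.sqrt N := Nat.mul_le_mul hKN hKN
    exact_mod_cast le_trans h1 (Nat.sqrt_le N)

theorem sqrt_sq_int {k : Int} (hk : 0 ≤ k) : Int.sqrt (k * k) = k := by
  obtain ⟨K, rfl⟩ := Int.eq_ofNat_of_zero_le hk
  rw [Int.sqrt]
  norm_cast
  simp [← Nat.pow_two, Nat.sqrt_eq']

-- r = ceil(sqrt(lo)) as computed by B is the least k with lo ≤ k*k
theorem lo_le_sq_iff {lo k : Int} (hlo : 0 ≤ lo) (hk : 0 ≤ k) :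
    lo ≤ k * k ↔ (if Int.sqrt lo * Int.sqrt lo < lo then Int.sqrt lo + 1 else Int.sqrt lo) ≤ k := by
  have hs0 := sqrt_nonneg_int lo
  have hsle : Int.sqrt lo * Int.sqrt lo ≤ lo := (sq_le_iff_le_sqrt hs0 hlo).mpr le_rfl
  split_ifs with h
  · constructor
    · intro hle
      by_contra hc
      have hk' : k ≤ Int.sqrt lo := by omega
      have := Int.mul_le_mul hk' hk' hk hs0
      omega
    · intro hle
      have h1 : Int.sqrt lo + 1 ≤ k := hle
      have h2 : (Int.sqrt lo + 1) * (Int.sqrt lo + 1) ≤ k * k :=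
        Int.mul_le_mul h1 h1 (by omega) (by omega)
      have hlt : lo < (Int.sqrt lo + 1) * (Int.sqrt lo + 1) := by
        by_contra hc
        have := (sq_le_iff_le_sqrt (by omega : (0:Int) ≤ Int.sqrt lo + 1) hlo).mp (by omega)
        omega
      omega
  · constructor
    · intro hle
      by_contra hc
      have hks : k < Int.sqrt lo := by omega
      have := Int.mul_le_mul (le_of_lt hks) (le_of_lt hks) hk hs0
      nlinarith
    · intro hle
      have := Int.mul_le_mul hle hle hs0 (le_trans hs0 hle)
      omega

-- the perfect squares of [start, end_] are exactly the squares of [r, isqrt end_]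
theorem filter_sq_eq_map (start end_ : Int) (h0 : 0 ≤ start) (hse : start ≤ end_) :
    ((PySem.List.pyRange start (end_ + 1) 1).filter
        (fun n => decide (Int.sqrt n * Int.sqrt n = n))) =
      (PySem.List.pyRange
          (if Int.sqrt start * Int.sqrt start < start then Int.sqrt start + 1 else Int.sqrt start)
          (Int.sqrt end_ + 1) 1).map (fun k => k * k) := by
  set r : Int := if Int.sqrt start * Int.sqrt start < start then Int.sqrt start + 1 else Int.sqrt start with hr
  have hrn : 0 ≤ r := by
    have := sqrt_nonneg_int start
    rw [hr]; split_ifs <;> omega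
  have hend : 0 ≤ end_ := le_trans h0 hse
  refine List.Perm.eq_of_pairwise (le := (· < ·)) ?_ ?_ ?_ ?_
  · intro a b _ _ h1 h2; omega
  · exact List.Pairwise.filter _ (PySem.List.pairwise_lt_pyRange_one _ _)
  · rw [List.pairwise_map]
    apply List.Pairwise.imp_of_mem ?_ (PySem.List.pairwise_lt_pyRange_one _ _)
    intro a b ha hb hab
    rw [PySem.List.mem_pyRange_one] at ha hb
    nlinarith [ha.1, hrn]
  · apply (List.perm_ext_iff_of_nodup ?_ ?_).mpr
    · intro n
      simp only [List.mem_filter, PySem.List.mem_pyRange_one, List.mem_map, decide_eq_true_eq]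
      constructor
      · rintro ⟨⟨hn1, hn2⟩, hsq⟩
        refine ⟨Int.sqrt n, ⟨?_, ?_⟩, hsq⟩
        · exact hr ▸ (lo_le_sq_iff h0 (sqrt_nonneg_int n)).mp (by omega)
        · have h1 : Int.sqrt n * Int.sqrt n ≤ end_ := by omega
          have := (sq_le_iff_le_sqrt (sqrt_nonneg_int n) hend).mp h1
          omega
      · rintro ⟨k, ⟨hk1, hk2⟩, rfl⟩
        have hk0 : 0 ≤ k := le_trans hrn hk1
        have hkk : k * k ≤ end_ := (sq_le_iff_le_sqrt hk0 hend).mpr (by omega)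
        refine ⟨⟨?_, by omega⟩, by rw [sqrt_sq_int hk0]⟩
        exact (lo_le_sq_iff h0 hk0).mpr (hr ▸ hk1)
    · exact (PySem.List.nodup_pyRange_one _ _).filter _
    · apply List.Nodup.map_on ?_ (PySem.List.nodup_pyRange_one _ _)
      intro a ha b hb hab
      rw [PySem.List.mem_pyRange_one] at ha hb
      nlinarith [ha.1, hb.1, hrn]

-- A's loop is an append-if fold, i.e. a filter
theorem squares_eq_filter (start end_ : Int) :
    squares start end_ =
      ((PySem.List.pyRange start (end_ + 1) 1).filter
        (fun num => pyEvenA (PySem.Int.toStr num).toList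
            && decide (Int.sqrt num * Int.sqrt num = num))) := by
  unfold squares
  have hfun : (fun (results : List Int) (num : Int) =>
        if pyEvenA (PySem.Int.toStr num).toList then
          let sqrt := Int.sqrt num
          if sqrt * sqrt = num then results ++ [num] else results
        else results)
      = (fun results num =>
        if (pyEvenA (PySem.Int.toStr num).toList
            && decide (Int.sqrt num * Int.sqrt num = num)) then results ++ [num] else results) := by
    funext res num
    by_cases h1 : pyEvenA (PySem.Int.toChars num)
    · by_cases h2 : Int.sqrt num * Int.sqrt num = num <;>
        simp [PySem.Int.toList_toStr, h1, h2]
    · simp [PySem.Int.toList_toStr, h1]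
  rw [hfun, PySem.List.foldl_append_if_eq_filter]
  simp

-- B's loop is an append-if fold, i.e. a filtered map
theorem squaresB_foldl (r b : Int) :
    (PySem.List.pyRange r b 1).foldl
        (fun results k => let n := k * k;
          if allEvenDigits n then results ++ [n] else results) []
      = ((PySem.List.pyRange r b 1).filter (fun k => allEvenDigits (k * k))).map
          (fun k => k * k) := by
  have h := PySem.List.foldl_append_if (p := fun k : Int => allEvenDigits (k * k))
    (f := fun k : Int => k * k) (l := PySem.List.pyRange r b 1) (acc := [])
  simpa using h

-- ===== VERDICT (by name: the statement is the Claim_ definition above) =====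
theorem squares_spec : Claim_equal_squares := by
  intro start end_ _ hpre
  unfold Spec_squares
  rcases hpre with h0 | hlt
  · by_cases hse : start ≤ end_
    · -- main case: 0 ≤ start ≤ end_
      have hend : ¬ (end_ < 0 ∨ start > end_) := by omega
      have hmax : max start 0 = start := by omega
      simp only [squares_alt, hend, if_false, hmax, squaresB_foldl]
      rw [squares_eq_filter, ← List.filter_filter, filter_sq_eq_map start end_ h0 hse,
        List.filter_map]
      congr 1
      apply List.filter_congr
      intro k _
      simp [pyEvenA_eq_all, allEvenDigits, Function.comp]
    · -- start ≤ end_ fails: both ranges are empty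
      have h1 : end_ + 1 ≤ start := by omega
      have h2 : end_ < 0 ∨ start > end_ := by omega
      simp [squares, squares_alt, PySem.List.pyRange_one_eq_nil h1, h2]
  · -- start > end_: both return []
    have h1 : end_ + 1 ≤ start := by omega
    have h2 : end_ < 0 ∨ start > end_ := by omega
    simp [squares, squares_alt, PySem.List.pyRange_one_eq_nil h1, h2]
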